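-- pv_equiv track=rewrite | github.com/ErwannL/Hospital-simulator | v2/get_data.py | position_nodes
-- ===== SOURCE A (Python) =====
-- def position_nodes(pathways):
--     """
--     Assigns specific positions to each node in the graph based on the order of appearance in the pathways.
--     The first pathway is placed horizontally, and the other pathways are placed vertically.
--
--     Arguments:
--     pathways -- list : A list of pathways, where each pathway is a list of steps (nodes).
--
--     Returns:
--     dict : A dictionary with node names as keys and their positions (x, y coordinates) as values.
--     """
--     # Initialize an empty dictionary to store the positions of each node
--     node_positions = {}
--
--     # Horizontal positioning for the first pathway
--     horizontal_path = pathways[0][0]  # Get the first pathway (list of steps)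
--     for i, node in enumerate(horizontal_path):
--         # Place nodes from the first pathway horizontally with a gap of 3 units between nodes
--         node_positions[node] = (i * 3, 0)  # x-coordinate increases by 3 for each node, y is fixed at 0
--
--     # Initialize y-position for subsequent pathways to be placed vertically
--     y_position = -2  # Start with a negative y-position for the second pathway
--     same_height_nodes = 3  # Control the vertical placement of nodes at the same y-level
--     changed_node_position = 0  # Track if a node's position has changed
--
--     # Iterate through the remaining pathways (excluding the first one)
--     for idx, (pathway, _) in enumerate(pathways[1:], start=1):
--         for i, node in enumerate(pathway):
--             # Only position nodes that haven't been positioned already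
--             if node not in node_positions:
--                 # Adjust y-position based on available space
--                 if same_height_nodes == 0:
--                     y_position -= 2  # Move to the next row after 3 nodes
--                     changed_node_position = 2  # Reset the node position counter
--                 else:
--                     changed_node_position = same_height_nodes
--                     same_height_nodes -= 1  # Decrease counter as nodes are positioned
--
--                 # Place nodes based on their position in the pathway and vertical constraints
--                 if changed_node_position == 1:
--                     node_positions[node] = ((i + 1) * 3, y_position)  # Position node at the current y-level
--                 elif same_height_nodes == 0:
--                     node_positions[node] = ((i - 2) * 3, y_position + 2)  # Position node at a higher y-level
--                 else:
--                     node_positions[node] = ((i - 1) * 3, y_position)  # Continue positioning nodes at current y-level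
--
--     # Return the dictionary with node positions (x, y coordinates)
--     return node_positions
-- ===== SOURCE B (Python) =====
-- def _closed_pos(c, i):
--     # position of the c-th previously-unseen node (0-indexed), at index i in its pathway
--     if c < 2:
--         return ((i - 1) * 3, -2)
--     if c == 2:
--         return ((i + 1) * 3, -2)
--     return ((i - 2) * 3, 4 - 2 * c)
--
--
-- def position_nodes(pathways):
--     pos = {}
--     for i, node in enumerate(pathways[0][0]):
--         pos[node] = (i * 3, 0)
--     # phase 1: collect the previously-unseen nodes of the later pathways, in order,
--     # each with its within-pathway index
--     seen = set(pos)
--     new_nodes = []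
--     for pathway, _ in pathways[1:]:
--         for i, node in enumerate(pathway):
--             if node not in seen:
--                 seen.add(node)
--                 new_nodes.append((i, node))
--     # phase 2: place them by a closed form of the running new-node count c
--     for c, (i, node) in enumerate(new_nodes):
--         pos[node] = _closed_pos(c, i)
--     return pos
-- ===== Notes on version B (the rewrite author's own statement) =====
-- stated objective: simpler
-- what changed: A's three-variable placement state machine (y_position/same_height_nodes/changed_node_position mutated per new node) is replaced by a two-phase decomposition: first collect the previously-unseen nodes of the later pathways with their within-pathway indices, then place each one by a closed-form formula of its global new-node count c.
-- outside the precondition, e.g. on position_nodes([]): A raises IndexError, B raises IndexError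
import Mathlib
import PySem

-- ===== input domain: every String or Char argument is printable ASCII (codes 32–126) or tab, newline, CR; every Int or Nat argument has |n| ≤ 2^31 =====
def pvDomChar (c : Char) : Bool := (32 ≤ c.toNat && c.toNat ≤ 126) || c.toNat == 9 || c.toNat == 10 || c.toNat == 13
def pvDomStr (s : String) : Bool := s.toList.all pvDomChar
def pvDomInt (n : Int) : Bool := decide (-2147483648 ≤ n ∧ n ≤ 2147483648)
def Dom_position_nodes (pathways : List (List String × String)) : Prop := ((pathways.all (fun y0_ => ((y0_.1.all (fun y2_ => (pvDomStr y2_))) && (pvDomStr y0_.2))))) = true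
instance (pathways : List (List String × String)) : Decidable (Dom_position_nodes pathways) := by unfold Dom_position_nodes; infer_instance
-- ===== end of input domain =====

-- B replaces A's three-variable placement state machine (y_position / same_height_nodes /
-- changed_node_position) by a two-phase decomposition: collect the unseen nodes first, then
-- place each from a closed form of its global new-node count; objective: simpler.

-- ===== PORT A =====
-- one step of A's inner loop over (i, node) with state (node_positions, y_position, same_height_nodes, changed_node_position)
def pvAStep (st : PySem.Dict String (Int × Int) × Int × Int × Int) (en : Int × String) :
    PySem.Dict String (Int × Int) × Int × Int × Int :=
  match st with
  | (d, y, shn, _chg) =>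
    if d.contains en.2 then st
    else
      let y' := if shn = 0 then y - 2 else y
      let chg' := if shn = 0 then 2 else shn
      let shn' := if shn = 0 then shn else shn - 1
      if chg' = 1 then (d.insert en.2 ((en.1 + 1) * 3, y'), y', shn', chg')
      else if shn' = 0 then (d.insert en.2 ((en.1 - 2) * 3, y' + 2), y', shn', chg')
      else (d.insert en.2 ((en.1 - 1) * 3, y'), y', shn', chg')

def position_nodes (pathways : List (List String × String)) : List (String × Int × Int) :=
  match pathways with
  | [] => []  -- Python raises IndexError on pathways[0]; excluded by Pre_
  | p0 :: rest =>
    let d0 := (PySem.List.enumerate p0.1).foldl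
      (fun (d : PySem.Dict String (Int × Int)) en => d.insert en.2 (en.1 * 3, 0)) PySem.Dict.empty
    (rest.foldl (fun st pw => (PySem.List.enumerate pw.1).foldl pvAStep st)
      (d0, -2, 3, 0)).1.items

-- ===== PORT B =====
-- closed-form position of the c-th previously-unseen node (0-indexed), pathway index i
def pvClosedPos (c i : Int) : Int × Int :=
  if c < 2 then ((i - 1) * 3, -2)
  else if c = 2 then ((i + 1) * 3, -2)
  else ((i - 2) * 3, 4 - 2 * c)

-- phase 1 step: collect an unseen node with its within-pathway index
def pvCollectStep (acc : List (Int × String) × PySem.Set String) (en : Int × String) :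
    List (Int × String) × PySem.Set String :=
  if acc.2.contains en.2 then acc else (acc.1 ++ [en], PySem.Set.add acc.2 en.2)

-- phase 2 step: place a collected node from the closed form
def pvPlaceStep (d : PySem.Dict String (Int × Int)) (cen : Int × (Int × String)) :
    PySem.Dict String (Int × Int) :=
  d.insert cen.2.2 (pvClosedPos cen.1 cen.2.1)

def position_nodes_alt (pathways : List (List String × String)) : List (String × Int × Int) :=
  match pathways with
  | [] => []
  | p0 :: rest =>
    let pos := (PySem.List.enumerate p0.1).foldl
      (fun (d : PySem.Dict String (Int × Int)) en => d.insert en.2 (en.1 * 3, 0)) PySem.Dict.empty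
    let collected := rest.foldl
      (fun acc pw => (PySem.List.enumerate pw.1).foldl pvCollectStep acc)
      (([] : List (Int × String)), PySem.Set.ofList pos.keys)
    ((PySem.List.enumerate collected.1).foldl pvPlaceStep pos).items

-- ===== PRECONDITION & SPEC =====
-- Pre_ excludes only the empty list, on which the Python A raises IndexError at pathways[0]
def Pre_position_nodes (pathways : List (List String × String)) : Prop := pathways ≠ []
instance (pathways : List (List String × String)) : Decidable (Pre_position_nodes pathways) := by
  unfold Pre_position_nodes; infer_instance

def pvWitness_position_nodes : (List (List String × String)) :=
  [(["a", "b"], "w1"), (["c", "a", "d"], "w2")]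

def Spec_position_nodes (pathways : List (List String × String)) (out : List (String × Int × Int)) : Prop := out = position_nodes_alt pathways
instance (pathways : List (List String × String)) (out : List (String × Int × Int)) : Decidable (Spec_position_nodes pathways out) := by unfold Spec_position_nodes; infer_instance

-- ===== CLAIM (what is proved, stated in full; the proofs are below) =====
def Claim_equal_position_nodes : Prop := ∀ (pathways : List (List String × String)), Dom_position_nodes pathways → Pre_position_nodes pathways → Spec_position_nodes pathways (position_nodes pathways)

-- ===== LEMMAS AND PROOFS =====

-- reference machine: A's state compressed to (dict, running count c of placed new nodes)
def pvMidStep (st : PySem.Dict String (Int × Int) × Int) (en : Int × String) :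
    PySem.Dict String (Int × Int) × Int :=
  if st.1.contains en.2 then st
  else (st.1.insert en.2 (pvClosedPos st.2 en.1), st.2 + 1)

-- A's y_position / same_height_nodes as functions of the count c
def pvYOf (c : Int) : Int := if c ≤ 3 then -2 else -2 - 2 * (c - 3)
def pvShnOf (c : Int) : Int := if 3 ≤ c then 0 else 3 - c

theorem pvA_step_new (d : PySem.Dict String (Int × Int)) (c chg : Int) (en : Int × String)
    (hc : 0 ≤ c) (h : d.contains en.2 = false) :
    pvAStep (d, pvYOf c, pvShnOf c, chg) en
      = (d.insert en.2 (pvClosedPos c en.1), pvYOf (c + 1), pvShnOf (c + 1),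
         if 3 ≤ c then 2 else 3 - c) := by
  simp only [pvAStep, h, Bool.false_eq_true, if_false]
  by_cases h3 : 3 ≤ c
  · have e1 : pvShnOf c = 0 := by simp [pvShnOf, h3]
    have e2 : pvShnOf (c + 1) = 0 := by simp [pvShnOf]; omega
    have e3 : pvYOf c - 2 = pvYOf (c + 1) := by simp only [pvYOf]; split_ifs <;> omega
    have e4 : pvYOf (c + 1) + 2 = 4 - 2 * c := by simp only [pvYOf]; split_ifs <;> omega
    have e5 : pvClosedPos c en.1 = ((en.1 - 2) * 3, 4 - 2 * c) := by
      simp only [pvClosedPos]; split_ifs <;> first | rfl | omega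
    simp only [e1, if_true, e3, e5, e4, e2, h3]
    norm_num
  · have e1 : pvShnOf c = 3 - c := by simp [pvShnOf, h3]
    by_cases h2 : c = 2
    · subst h2; norm_num [pvShnOf, pvYOf, pvClosedPos]
    · have e5 : pvClosedPos c en.1 = ((en.1 - 1) * 3, -2) := by
        simp only [pvClosedPos]; split_ifs <;> first | rfl | omega
      have e6 : pvYOf c = -2 := by simp only [pvYOf]; split_ifs <;> omega
      have e7 : pvYOf (c + 1) = -2 := by simp only [pvYOf]; split_ifs <;> omega
      have e8 : pvShnOf (c + 1) = 3 - c - 1 := by simp only [pvShnOf]; split_ifs <;> omega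
      simp only [e1, e5, e6, e7, e8, h3]
      split_ifs <;> first | (exfalso; omega) | norm_num

theorem pvA_fold (l : List (Int × String)) :
    ∀ (d : PySem.Dict String (Int × Int)) (c chg : Int), 0 ≤ c →
    ∃ chg', l.foldl pvAStep (d, pvYOf c, pvShnOf c, chg)
      = ((l.foldl pvMidStep (d, c)).1, pvYOf (l.foldl pvMidStep (d, c)).2,
         pvShnOf (l.foldl pvMidStep (d, c)).2, chg')
      ∧ 0 ≤ (l.foldl pvMidStep (d, c)).2 := by
  induction l with
  | nil => intro d c chg hc; exact ⟨chg, rfl, hc⟩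
  | cons en l ih =>
    intro d c chg hc
    simp only [List.foldl_cons]
    by_cases h : d.contains en.2
    · have hA : pvAStep (d, pvYOf c, pvShnOf c, chg) en = (d, pvYOf c, pvShnOf c, chg) := by
        simp [pvAStep, h]
      have hM : pvMidStep (d, c) en = (d, c) := by simp [pvMidStep, h]
      rw [hA, hM]; exact ih d c chg hc
    · have h' : d.contains en.2 = false := by simpa using h
      rw [pvA_step_new d c chg en hc h']
      have hM : pvMidStep (d, c) en = (d.insert en.2 (pvClosedPos c en.1), c + 1) := by
        simp [pvMidStep, h']
      rw [hM]
      exact ih _ (c + 1) _ (by omega)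

theorem pvA_outer (rest : List (List String × String)) :
    ∀ (d : PySem.Dict String (Int × Int)) (c chg : Int), 0 ≤ c →
    ∃ chg', rest.foldl (fun st pw => (PySem.List.enumerate pw.1).foldl pvAStep st)
        (d, pvYOf c, pvShnOf c, chg)
      = ((rest.foldl (fun st pw => (PySem.List.enumerate pw.1).foldl pvMidStep st) (d, c)).1,
         pvYOf (rest.foldl (fun st pw => (PySem.List.enumerate pw.1).foldl pvMidStep st) (d, c)).2,
         pvShnOf (rest.foldl (fun st pw => (PySem.List.enumerate pw.1).foldl pvMidStep st) (d, c)).2, chg')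
      ∧ 0 ≤ (rest.foldl (fun st pw => (PySem.List.enumerate pw.1).foldl pvMidStep st) (d, c)).2 := by
  induction rest with
  | nil => intro d c chg hc; exact ⟨chg, rfl, hc⟩
  | cons pw rest ih =>
    intro d c chg hc
    simp only [List.foldl_cons]
    obtain ⟨chg1, h1, h1c⟩ := pvA_fold (PySem.List.enumerate pw.1) d c chg hc
    rw [h1]
    set m := (PySem.List.enumerate pw.1).foldl pvMidStep (d, c) with hm
    obtain ⟨chg2, h2, h2c⟩ := ih m.1 m.2 chg1 h1c
    rw [show m = (m.1, m.2) from rfl] at *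
    exact ⟨chg2, h2, h2c⟩


theorem pvCollect_acc (l : List (Int × String)) :
    ∀ (acc : List (Int × String)) (S : PySem.Set String),
    l.foldl pvCollectStep (acc, S)
      = (acc ++ (l.foldl pvCollectStep ([], S)).1, (l.foldl pvCollectStep ([], S)).2) := by
  induction l with
  | nil => intro acc S; simp
  | cons en l ih =>
    intro acc S
    simp only [List.foldl_cons, pvCollectStep]
    by_cases h : S.contains en.2
    · simp only [h, if_true]; exact ih acc S
    · simp only [h, Bool.false_eq_true, if_false, List.nil_append]
      rw [ih (acc ++ [en]) _, ih [en] _]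
      simp
theorem pvCollectOuter_acc (rest : List (List String × String)) :
    ∀ (acc : List (Int × String)) (S : PySem.Set String),
    rest.foldl (fun a pw => (PySem.List.enumerate pw.1).foldl pvCollectStep a) (acc, S)
      = (acc ++ (rest.foldl (fun a pw => (PySem.List.enumerate pw.1).foldl pvCollectStep a) ([], S)).1,
         (rest.foldl (fun a pw => (PySem.List.enumerate pw.1).foldl pvCollectStep a) ([], S)).2) := by
  induction rest with
  | nil => intro acc S; simp
  | cons pw rest ih =>
    intro acc S
    simp only [List.foldl_cons]
    rw [pvCollect_acc _ acc S]
    set p := (PySem.List.enumerate pw.1).foldl pvCollectStep ([], S) with hp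
    rw [show p = (p.1, p.2) from rfl, ih (acc ++ p.1) p.2, ih p.1 p.2]
    simp

theorem pvFuseInner (l : List (Int × String)) :
    ∀ (S : PySem.Set String) (d : PySem.Dict String (Int × Int)) (c : Int),
    (∀ n, S.contains n = d.contains n) →
    (PySem.List.enumerate (l.foldl pvCollectStep ([], S)).1 c).foldl pvPlaceStep d
        = (l.foldl pvMidStep (d, c)).1
    ∧ (l.foldl pvMidStep (d, c)).2 = c + ((l.foldl pvCollectStep ([], S)).1.length : Int)
    ∧ (∀ n, (l.foldl pvCollectStep ([], S)).2.contains n = (l.foldl pvMidStep (d, c)).1.contains n) := by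
  induction l with
  | nil =>
    intro S d c hS
    refine ⟨rfl, by simp, hS⟩
  | cons en l ih =>
    intro S d c hS
    simp only [List.foldl_cons]
    by_cases h : S.contains en.2
    · have hd : d.contains en.2 = true := by rw [← hS]; exact h
      have hC : pvCollectStep ([], S) en = ([], S) := by simp [pvCollectStep, (PySem.Set.contains_iff S en.2).1 h]
      have hM : pvMidStep (d, c) en = (d, c) := by simp [pvMidStep, hd]
      rw [hC, hM]; exact ih S d c hS
    · have hb : S.contains en.2 = false := by simpa using h
      have hd : d.contains en.2 = false := by rw [← hS]; exact hb
      have hnm : en.2 ∉ S := fun hm => by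
        rw [(PySem.Set.contains_iff S en.2).2 hm] at hb; exact absurd hb (by simp)
      have hC : pvCollectStep ([], S) en = ([en], PySem.Set.add S en.2) := by
        simp [pvCollectStep, hnm]
      have hM : pvMidStep (d, c) en = (d.insert en.2 (pvClosedPos c en.1), c + 1) := by
        simp [pvMidStep, hd]
      rw [hC, hM]
      set S' := PySem.Set.add S en.2 with hS'
      set d1 := d.insert en.2 (pvClosedPos c en.1) with hd1
      have hS1 : ∀ n, S'.contains n = d1.contains n := by
        intro n
        have hmem : n ∈ S ↔ d.contains n = true := by rw [← PySem.Set.contains_iff, hS]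
        rw [hS', hd1, PySem.Dict.contains_insert, Bool.eq_iff_iff, PySem.Set.contains_iff,
          PySem.Set.mem_add]
        simp only [Bool.or_eq_true, beq_iff_eq]
        rw [hmem]
        tauto
      have hsplit := pvCollect_acc l [en] S'
      rw [hsplit]
      obtain ⟨ih1, ih2, ih3⟩ := ih S' d1 (c + 1) hS1
      refine ⟨?_, ?_, ?_⟩
      · rw [List.singleton_append, PySem.List.enumerate_cons, List.foldl_cons]
        have : pvPlaceStep d (c, en) = d1 := by simp [pvPlaceStep, hd1]
        rw [this]; exact ih1
      · rw [ih2]; simp; omega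
      · exact ih3

theorem pvFuseOuter (rest : List (List String × String)) :
    ∀ (S : PySem.Set String) (d : PySem.Dict String (Int × Int)) (c : Int),
    (∀ n, S.contains n = d.contains n) →
    (PySem.List.enumerate
        (rest.foldl (fun a pw => (PySem.List.enumerate pw.1).foldl pvCollectStep a) ([], S)).1 c).foldl
        pvPlaceStep d
      = (rest.foldl (fun st pw => (PySem.List.enumerate pw.1).foldl pvMidStep st) (d, c)).1
    ∧ (∀ n, (rest.foldl (fun a pw => (PySem.List.enumerate pw.1).foldl pvCollectStep a) ([], S)).2.contains n
        = (rest.foldl (fun st pw => (PySem.List.enumerate pw.1).foldl pvMidStep st) (d, c)).1.contains n) := by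
  induction rest with
  | nil => intro S d c hS; exact ⟨rfl, hS⟩
  | cons pw rest ih =>
    intro S d c hS
    simp only [List.foldl_cons]
    set p := (PySem.List.enumerate pw.1).foldl pvCollectStep ([], S) with hp
    set m := (PySem.List.enumerate pw.1).foldl pvMidStep (d, c) with hm
    obtain ⟨i1, i2, i3⟩ := pvFuseInner (PySem.List.enumerate pw.1) S d c hS
    rw [show p = (p.1, p.2) from rfl, pvCollectOuter_acc rest p.1 p.2]
    obtain ⟨o1, o2⟩ := ih p.2 m.1 m.2 i3
    constructor
    · rw [PySem.List.enumerate_append, List.foldl_append, i1, ← i2, o1,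
        show m = (m.1, m.2) from rfl]
    · intro n
      rw [o2 n, show m = (m.1, m.2) from rfl]

-- ===== VERDICT (by name: the statement is the Claim_ definition above) =====
theorem position_nodes_spec : Claim_equal_position_nodes := by
  intro pathways _hdom hpre
  unfold Spec_position_nodes
  match pathways with
  | [] => exact absurd rfl hpre
  | p0 :: rest =>
    simp only [position_nodes, position_nodes_alt]
    set d0 := (PySem.List.enumerate p0.1).foldl
      (fun (d : PySem.Dict String (Int × Int)) en => d.insert en.2 (en.1 * 3, 0))
      PySem.Dict.empty with hd0
    have hy : (-2 : Int) = pvYOf 0 := by decide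
    have hs : (3 : Int) = pvShnOf 0 := by decide
    rw [hy, hs]
    obtain ⟨chg', hA, _⟩ := pvA_outer rest d0 0 0 le_rfl
    rw [hA]
    have hS0 : ∀ n, (PySem.Set.ofList d0.keys).contains n = d0.contains n := by
      intro n
      rw [Bool.eq_iff_iff, PySem.Set.contains_iff, PySem.Set.mem_ofList,
        PySem.Dict.contains_iff_mem_keys]
    obtain ⟨hB, _⟩ := pvFuseOuter rest (PySem.Set.ofList d0.keys) d0 0 hS0
    rw [hB]
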